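-- pv_equiv track=rewrite | github.com/benmor20/lyric-quiz-generator | src/song.py | _possible_phrases
-- ===== SOURCE A (Python) =====
-- def _possible_phrases(phrase, replacements):
--     target, replace = next(iter(replacements.items()))
--
--     if target in phrase:
--         if len(replacements) == 1:
--             yield from (phrase.replace(target, r) for r in replace)
--         else:
--             new_replacements = {k: v for k, v in replacements.items() if k != target}
--             for r in replace:
--                 yield from _possible_phrases(phrase.replace(target, r), new_replacements)
--     else:
--         if len(replacements) == 1:
--             yield phrase
--         else:
--             new_replacements = {k: v for k, v in replacements.items() if k != target}
--             yield from _possible_phrases(phrase, new_replacements)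
-- ===== SOURCE B (Python) =====
-- def _possible_phrases(phrase, replacements):
--     # Iterative BFS: keep a frontier of partial phrases and fold each
--     # replacement rule over it, instead of recursing per rule.
--     frontier = [phrase]
--     for target, replace in replacements.items():
--         frontier = [q
--                     for p in frontier
--                     for q in ((p.replace(target, r) for r in replace)
--                               if target in p else (p,))]
--     yield from frontier
-- ===== Notes on version B (the rewrite author's own statement) =====
-- stated objective: alternative
-- what changed: Replaced the per-rule recursive DFS generator by an iterative breadth-first pass that folds each replacement rule over an explicit frontier list of partial phrases.
import Mathlib
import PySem

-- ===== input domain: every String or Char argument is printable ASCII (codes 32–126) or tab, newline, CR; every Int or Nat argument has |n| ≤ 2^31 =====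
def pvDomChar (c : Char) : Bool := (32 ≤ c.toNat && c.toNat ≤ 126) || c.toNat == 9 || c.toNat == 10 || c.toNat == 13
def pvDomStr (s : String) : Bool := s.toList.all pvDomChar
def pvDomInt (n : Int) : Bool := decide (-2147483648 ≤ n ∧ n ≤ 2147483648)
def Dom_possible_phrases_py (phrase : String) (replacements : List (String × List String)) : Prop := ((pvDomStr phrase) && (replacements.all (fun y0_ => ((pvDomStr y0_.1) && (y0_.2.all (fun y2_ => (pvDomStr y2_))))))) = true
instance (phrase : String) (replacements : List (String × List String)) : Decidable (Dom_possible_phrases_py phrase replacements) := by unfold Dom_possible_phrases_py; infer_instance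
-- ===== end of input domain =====

-- B replaces A's per-rule recursive DFS by an iterative breadth-first fold over an
-- explicit frontier of partial phrases (same outputs, same order; not faster).

-- ===== PORT A =====
-- A recurses on the dict minus its first key; since dict keys are unique, the
-- comprehension {k: v for k, v in replacements.items() if k != target} is exactly
-- the remaining items 'rest' of the association list, and we recurse on that.
def possible_phrases_py (phrase : String) (replacements : List (String × List String)) : List String :=
  match replacements with
  | [] => []   -- unreachable under Pre_: Python A raises RuntimeError here
  | (target, replace) :: rest =>
    if PySem.Str.isIn target phrase then
      if rest = [] then
        replace.map (fun r => PySem.Str.replace phrase target r)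
      else
        replace.flatMap (fun r => possible_phrases_py (PySem.Str.replace phrase target r) rest)
    else
      if rest = [] then [phrase]
      else possible_phrases_py phrase rest

-- ===== PORT B =====
def possible_phrases_py_alt (phrase : String) (replacements : List (String × List String)) : List String :=
  replacements.foldl
    (fun frontier tr =>
      frontier.flatMap (fun p =>
        if PySem.Str.isIn tr.1 p then tr.2.map (fun r => PySem.Str.replace p tr.1 r)
        else [p]))
    [phrase]

-- ===== PRECONDITION & SPEC =====
-- Pre_ excludes the empty dict, on which Python A raises RuntimeError (PEP 479).
def Pre_possible_phrases_py (phrase : String) (replacements : List (String × List String)) : Prop :=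
  replacements ≠ []
instance (phrase : String) (replacements : List (String × List String)) : Decidable (Pre_possible_phrases_py phrase replacements) := by unfold Pre_possible_phrases_py; infer_instance

def pvWitness_possible_phrases_py : String × (List (String × List String)) :=
  ("a b", [("a", ["x", "y"]), ("b", ["z"])])

def Spec_possible_phrases_py (phrase : String) (replacements : List (String × List String)) (out : List String) : Prop := out = possible_phrases_py_alt phrase replacements
instance (phrase : String) (replacements : List (String × List String)) (out : List String) : Decidable (Spec_possible_phrases_py phrase replacements out) := by unfold Spec_possible_phrases_py; infer_instance

-- ===== CLAIM (what is proved, stated in full; the proofs are below) =====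
def Claim_equal_possible_phrases_py : Prop := ∀ (phrase : String) (replacements : List (String × List String)), Dom_possible_phrases_py phrase replacements → Pre_possible_phrases_py phrase replacements → Spec_possible_phrases_py phrase replacements (possible_phrases_py phrase replacements)

-- ===== LEMMAS AND PROOFS =====

-- The frontier-extension step of B's fold, named for the proofs.
def pvExt (tr : String × List String) (p : String) : List String :=
  if PySem.Str.isIn tr.1 p then tr.2.map (fun r => PySem.Str.replace p tr.1 r) else [p]

def pvStep (frontier : List String) (tr : String × List String) : List String :=
  frontier.flatMap (pvExt tr)

lemma alt_eq_foldl (phrase : String) (l : List (String × List String)) :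
    possible_phrases_py_alt phrase l = l.foldl pvStep [phrase] := rfl

lemma pvStep_singleton (tr : String × List String) (p : String) :
    pvStep [p] tr = pvExt tr p := by
  simp [pvStep]

-- B's fold started from any frontier is the concatenation of the folds started
-- from its singleton pieces (the step extends each phrase independently).
lemma foldl_pvStep_flatMap (l : List (String × List String)) (F : List String) :
    l.foldl pvStep F = F.flatMap (fun q => l.foldl pvStep [q]) := by
  induction l generalizing F with
  | nil => simp [List.foldl_nil]
  | cons tr rest ih =>
    simp only [List.foldl_cons]
    rw [ih (pvStep F tr)]
    show (F.flatMap (pvExt tr)).flatMap _ = _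
    rw [List.flatMap_assoc]
    exact List.flatMap_congr (fun q _ => by
      rw [pvStep_singleton, ih (pvExt tr q)])

lemma portA_eq_altB (phrase : String) (replacements : List (String × List String))
    (h : replacements ≠ []) :
    possible_phrases_py phrase replacements = possible_phrases_py_alt phrase replacements := by
  induction replacements generalizing phrase with
  | nil => exact absurd rfl h
  | cons tr rest ih =>
    obtain ⟨target, replace⟩ := tr
    rw [alt_eq_foldl, List.foldl_cons, pvStep_singleton]
    by_cases hrest : rest = []
    · subst hrest
      simp only [possible_phrases_py, List.foldl_nil, pvExt]
      split_ifs <;> rfl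
    · simp only [possible_phrases_py, if_neg hrest, pvExt]
      rw [foldl_pvStep_flatMap]
      by_cases hin : PySem.Str.isIn target phrase
      · simp only [if_pos hin, List.flatMap_map]
        exact List.flatMap_congr (fun r _ => ih _ hrest)
      · simp only [if_neg hin, List.flatMap_singleton]
        exact ih _ hrest

-- ===== VERDICT (by name: the statement is the Claim_ definition above) =====
theorem possible_phrases_py_spec : Claim_equal_possible_phrases_py := by
  intro phrase replacements _ hpre
  unfold Spec_possible_phrases_py
  exact portA_eq_altB phrase replacements hpre
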